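-- pv_equiv track=rewrite | github.com/erturkmemmedli/Data-Structures-and-Algorithms | Algorithmic Toolbox/Dynamic Programming/lcs3.py | matrix_3D
-- ===== SOURCE A (Python) =====
-- def matrix_3D(x, y, z):
--     n = len(x)
--     m = len(y)
--     k = len(z)
--
--     A = [[[0] * (k+1) for _ in range(m+1)] for _ in range(n+1)]
--
--     for i in range(1, n+1):
--         for j in range(1, m+1):
--             for k in range(1, k+1):
--                 v1 = A[i][j][k-1]
--                 v2 = A[i][j-1][k]
--                 v3 = A[i][j-1][k-1]
--                 v4 = A[i-1][j][k]
--                 v5 = A[i-1][j][k-1]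
--                 v6 = A[i-1][j-1][k]
--                 v7 = A[i-1][j-1][k-1]
--                 match = A[i-1][j-1][k-1] + 1
--
--                 if x[i-1] == y[j-1] == z[k-1] and v1 == v2 == v3 == v4 == v5 == v6 == v7:
--                         A[i][j][k] = max(v1, v2, v3, v4, v5, v6, match)
--                 else:
--                     A[i][j][k] = max(v1, v2, v3, v4, v5, v6, v7)
--     return A
-- ===== SOURCE B (Python) =====
-- def matrix_3D(x, y, z):
--     n, m, K = len(x), len(y), len(z)
--     memo = {}
--     for s in range(3, n + m + K + 1):
--         for i in range(1, n + 1):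
--             for j in range(1, m + 1):
--                 k = s - i - j
--                 if 1 <= k <= K:
--                     g = memo.get
--                     v1 = g((i, j, k - 1), 0)
--                     v2 = g((i, j - 1, k), 0)
--                     v3 = g((i, j - 1, k - 1), 0)
--                     v4 = g((i - 1, j, k), 0)
--                     v5 = g((i - 1, j, k - 1), 0)
--                     v6 = g((i - 1, j - 1, k), 0)
--                     v7 = g((i - 1, j - 1, k - 1), 0)
--                     if x[i - 1] == y[j - 1] == z[k - 1] and v1 == v2 == v3 == v4 == v5 == v6 == v7:
--                         memo[(i, j, k)] = max(v1, v2, v3, v4, v5, v6, v7 + 1)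
--                     else:
--                         memo[(i, j, k)] = max(v1, v2, v3, v4, v5, v6, v7)
--     return [[[memo.get((i, j, k), 0) for k in range(K + 1)]
--              for j in range(m + 1)]
--             for i in range(n + 1)]
-- ===== Notes on version B (the rewrite author's own statement) =====
-- stated objective: alternative
-- what changed: A fills a pre-allocated (n+1)x(m+1)x(k+1) nested list in place with a row-major triple loop; B computes the cells in anti-diagonal wavefront order (layer by layer of constant i+j+k, whose dependencies all lie in lower layers) into a sparse dict keyed by (i,j,k) and assembles the nested-list table from the dict at the end.
import Mathlib
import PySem

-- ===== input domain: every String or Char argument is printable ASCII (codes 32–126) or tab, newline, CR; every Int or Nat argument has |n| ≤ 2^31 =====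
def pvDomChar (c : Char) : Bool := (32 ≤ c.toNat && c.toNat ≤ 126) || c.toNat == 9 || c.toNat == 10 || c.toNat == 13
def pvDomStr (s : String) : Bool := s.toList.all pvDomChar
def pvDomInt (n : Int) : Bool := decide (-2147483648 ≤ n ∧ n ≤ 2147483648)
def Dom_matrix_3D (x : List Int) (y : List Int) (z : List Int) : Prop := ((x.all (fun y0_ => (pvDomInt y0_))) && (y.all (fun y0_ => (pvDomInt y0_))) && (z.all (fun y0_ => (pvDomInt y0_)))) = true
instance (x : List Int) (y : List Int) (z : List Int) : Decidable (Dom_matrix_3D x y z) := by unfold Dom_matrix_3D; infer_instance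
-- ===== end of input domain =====

-- B replaces A's row-major triple loop over a pre-allocated 3D table (in-place writes)
-- by an anti-diagonal wavefront: cells are computed layer by layer of constant i+j+k into
-- a sparse dict keyed by (i,j,k) (all dependencies of a cell lie in lower layers), and the
-- nested-list table is assembled from the dict at the end (objective: alternative).

-- ===== PORT A =====
-- A[i][j][k] read; all indices produced by the loops are nonnegative and in range,
-- so getD with default is exact here.
def pvGet3 (A : List (List (List Int))) (i j k : Nat) : Int :=
  ((A.getD i []).getD j []).getD k 0
-- A[i][j][k] = v
def pvSet3 (A : List (List (List Int))) (i j k : Nat) (v : Int) : List (List (List Int)) :=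
  A.modify i (fun P => P.modify j (fun r => r.set k v))

-- the body of the innermost loop; loop variables i0,j0,k0 run over range(n)/range(m)/range(K),
-- standing for Python's i-1, j-1, k-1 (Python iterates i,j,k from 1).  The Python inner loop
-- variable k shadows the outer k = len(z), but at each evaluation of range(1, k+1) its value
-- is len(z) again (it is left at len(z) by the previous pass, or never changed when len(z)=0),
-- so the bound is exactly len(z).
def pvStepA (x y z : List Int) (i0 j0 : Nat) (A : List (List (List Int))) (k0 : Nat) :
    List (List (List Int)) :=
  let v1 := pvGet3 A (i0+1) (j0+1) k0
  let v2 := pvGet3 A (i0+1) j0 (k0+1)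
  let v3 := pvGet3 A (i0+1) j0 k0
  let v4 := pvGet3 A i0 (j0+1) (k0+1)
  let v5 := pvGet3 A i0 (j0+1) k0
  let v6 := pvGet3 A i0 j0 (k0+1)
  let v7 := pvGet3 A i0 j0 k0
  let mtch := pvGet3 A i0 j0 k0 + 1
  if (x.getD i0 0 = y.getD j0 0 ∧ y.getD j0 0 = z.getD k0 0) ∧
     (v1 = v2 ∧ v2 = v3 ∧ v3 = v4 ∧ v4 = v5 ∧ v5 = v6 ∧ v6 = v7) then
    pvSet3 A (i0+1) (j0+1) (k0+1) (max (max (max (max (max (max v1 v2) v3) v4) v5) v6) mtch)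
  else
    pvSet3 A (i0+1) (j0+1) (k0+1) (max (max (max (max (max (max v1 v2) v3) v4) v5) v6) v7)

def matrix_3D (x : List Int) (y : List Int) (z : List Int) : List (List (List Int)) :=
  let n := x.length
  let m := y.length
  let K := z.length
  let A0 := List.replicate (n+1) (List.replicate (m+1) (List.replicate (K+1) (0:Int)))
  (List.range n).foldl (fun A i0 =>
    (List.range m).foldl (fun A j0 =>
      (List.range K).foldl (pvStepA x y z i0 j0) A) A) A0

-- ===== PORT B =====
-- body of Source B's innermost loop at layer s, cell (i,j): k = s - i - j (an int, may be ≤ 0),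
-- and only 1 <= k <= K is stored; dict lookups memo.get(key, 0) are Dict.getD _ 0
def pvCellStep (x y z : List Int) (s i j : Nat)
    (memo : PySem.Dict (Nat × Nat × Nat) Int) : PySem.Dict (Nat × Nat × Nat) Int :=
  let kI : Int := (s : Int) - (i : Int) - (j : Int)
  if 1 ≤ kI ∧ kI ≤ (z.length : Int) then
    let k := kI.toNat
    let v1 := memo.getD (i, j, k-1) 0
    let v2 := memo.getD (i, j-1, k) 0
    let v3 := memo.getD (i, j-1, k-1) 0
    let v4 := memo.getD (i-1, j, k) 0
    let v5 := memo.getD (i-1, j, k-1) 0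
    let v6 := memo.getD (i-1, j-1, k) 0
    let v7 := memo.getD (i-1, j-1, k-1) 0
    if (x.getD (i-1) 0 = y.getD (j-1) 0 ∧ y.getD (j-1) 0 = z.getD (k-1) 0) ∧
       (v1 = v2 ∧ v2 = v3 ∧ v3 = v4 ∧ v4 = v5 ∧ v5 = v6 ∧ v6 = v7) then
      memo.insert (i, j, k) (max (max (max (max (max (max v1 v2) v3) v4) v5) v6) (v7 + 1))
    else
      memo.insert (i, j, k) (max (max (max (max (max (max v1 v2) v3) v4) v5) v6) v7)
  else memo

def matrix_3D_alt (x : List Int) (y : List Int) (z : List Int) : List (List (List Int)) :=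
  let n := x.length
  let m := y.length
  let K := z.length
  let memo := (List.range' 3 (n + m + K + 1 - 3)).foldl (fun memo s =>
      (List.range' 1 n).foldl (fun memo i =>
        (List.range' 1 m).foldl (fun memo j => pvCellStep x y z s i j memo) memo) memo)
    PySem.Dict.empty
  (List.range (n+1)).map (fun i => (List.range (m+1)).map (fun j =>
    (List.range (K+1)).map (fun k => memo.getD (i, j, k) 0)))

-- ===== PRECONDITION & SPEC =====
def Spec_matrix_3D (x : List Int) (y : List Int) (z : List Int) (out : List (List (List Int))) : Prop := out = matrix_3D_alt x y z
instance (x : List Int) (y : List Int) (z : List Int) (out : List (List (List Int))) : Decidable (Spec_matrix_3D x y z out) := by unfold Spec_matrix_3D; infer_instance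

-- ===== CLAIM (what is proved, stated in full; the proofs are below) =====
def Claim_equal_matrix_3D : Prop := ∀ (x : List Int) (y : List Int) (z : List Int), Dom_matrix_3D x y z → Spec_matrix_3D x y z (matrix_3D x y z)

-- ===== LEMMAS AND PROOFS =====

-- the unique solution of the recurrence: value of cell (i,j,k) of the finished table
def cell (x y z : List Int) (i j k : Nat) : Int :=
  if h : i = 0 ∨ j = 0 ∨ k = 0 then 0
  else
    let v1 := cell x y z i j (k-1)
    let v2 := cell x y z i (j-1) k
    let v3 := cell x y z i (j-1) (k-1)
    let v4 := cell x y z (i-1) j k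
    let v5 := cell x y z (i-1) j (k-1)
    let v6 := cell x y z (i-1) (j-1) k
    let v7 := cell x y z (i-1) (j-1) (k-1)
    if (x.getD (i-1) 0 = y.getD (j-1) 0 ∧ y.getD (j-1) 0 = z.getD (k-1) 0) ∧
       (v1 = v2 ∧ v2 = v3 ∧ v3 = v4 ∧ v4 = v5 ∧ v5 = v6 ∧ v6 = v7) then
      max (max (max (max (max (max v1 v2) v3) v4) v5) v6) (v7 + 1)
    else
      max (max (max (max (max (max v1 v2) v3) v4) v5) v6) v7
termination_by i + j + k
decreasing_by all_goals omega

theorem cell_zero (x y z : List Int) (i j k : Nat) (h : i = 0 ∨ j = 0 ∨ k = 0) :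
    cell x y z i j k = 0 := by
  rw [cell, dif_pos h]

theorem cell_of_pos (x y z : List Int) (i j k : Nat)
    (hi : 1 ≤ i) (hj : 1 ≤ j) (hk : 1 ≤ k) :
    cell x y z i j k =
      if (x.getD (i-1) 0 = y.getD (j-1) 0 ∧ y.getD (j-1) 0 = z.getD (k-1) 0) ∧
         (cell x y z i j (k-1) = cell x y z i (j-1) k ∧
          cell x y z i (j-1) k = cell x y z i (j-1) (k-1) ∧
          cell x y z i (j-1) (k-1) = cell x y z (i-1) j k ∧
          cell x y z (i-1) j k = cell x y z (i-1) j (k-1) ∧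
          cell x y z (i-1) j (k-1) = cell x y z (i-1) (j-1) k ∧
          cell x y z (i-1) (j-1) k = cell x y z (i-1) (j-1) (k-1)) then
        max (max (max (max (max (max (cell x y z i j (k-1)) (cell x y z i (j-1) k))
          (cell x y z i (j-1) (k-1))) (cell x y z (i-1) j k)) (cell x y z (i-1) j (k-1)))
          (cell x y z (i-1) (j-1) k)) (cell x y z (i-1) (j-1) (k-1) + 1)
      else
        max (max (max (max (max (max (cell x y z i j (k-1)) (cell x y z i (j-1) k))
          (cell x y z i (j-1) (k-1))) (cell x y z (i-1) j k)) (cell x y z (i-1) j (k-1)))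
          (cell x y z (i-1) (j-1) k)) (cell x y z (i-1) (j-1) (k-1)) := by
  rw [cell, dif_neg (by omega)]

-- row j of slice i of the finished table, and slice i
def rowOf (x y z : List Int) (i j : Nat) : List Int :=
  (List.range (z.length+1)).map (cell x y z i j)
def sliceOf (x y z : List Int) (i : Nat) : List (List Int) :=
  (List.range (y.length+1)).map (rowOf x y z i)

theorem rowOf_cons (x y z : List Int) (i j : Nat) :
    rowOf x y z i j = cell x y z i j 0 :: (List.range' 1 z.length).map (cell x y z i j) := by
  rw [rowOf, List.range_eq_range', List.range'_succ, List.map_cons]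

theorem sliceOf_cons (x y z : List Int) (i : Nat) :
    sliceOf x y z i = rowOf x y z i 0 :: (List.range' 1 y.length).map (rowOf x y z i) := by
  rw [sliceOf, List.range_eq_range', List.range'_succ, List.map_cons]

theorem rowOf_left_zero (x y z : List Int) (j : Nat) :
    rowOf x y z 0 j = List.replicate (z.length+1) 0 := by
  rw [rowOf, List.map_congr_left (fun a _ => cell_zero x y z 0 j a (Or.inl rfl))]
  simp [List.map_const']

theorem rowOf_mid_zero (x y z : List Int) (i : Nat) :
    rowOf x y z i 0 = List.replicate (z.length+1) 0 := by
  rw [rowOf, List.map_congr_left (fun a _ => cell_zero x y z i 0 a (Or.inr (Or.inl rfl)))]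
  simp [List.map_const']

theorem sliceOf_zero (x y z : List Int) :
    sliceOf x y z 0 = List.replicate (y.length+1) (List.replicate (z.length+1) 0) := by
  rw [sliceOf, List.map_congr_left (fun a _ => rowOf_left_zero x y z a)]
  simp [List.map_const']

-- ---- A-side: the in-place triple loop produces slice-by-slice rows (pvTableB below),
-- ---- which in turn are the rows of cell

theorem pv_getD_modify_ne {α : Type} (l : List α) (f : α → α) (d : α) {i j : Nat}
    (h : i ≠ j) : (l.modify i f).getD j d = l.getD j d := by
  simp [List.getD_eq_getElem?_getD, h]

theorem pv_getD_modify_eq {α : Type} (l : List α) (f : α → α) (d : α) {i : Nat}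
    (h : i < l.length) : (l.modify i f).getD i d = f (l.getD i d) := by
  simp [List.getD_eq_getElem?_getD, List.getElem?_eq_getElem h]

theorem pv_modify_modify {α : Type} (l : List α) (f g : α → α) (i : Nat) :
    (l.modify i f).modify i g = l.modify i (fun a => g (f a)) := by
  apply List.ext_getElem?
  intro j
  by_cases h : i = j
  · simp [h]
    cases l[j]? <;> simp
  · simp [h]

theorem pv_modify_const {α : Type} [Inhabited α] (l : List α) (R : α) (i : Nat) :
    l.modify i (fun _ => R) = l.set i R := by
  simp [List.modify_eq_set]

theorem pv_modify_self {α : Type} [Inhabited α] (l : List α) (d : α) {i : Nat}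
    (h : i < l.length) : l.modify i (fun _ => l.getD i d) = l := by
  rw [pv_modify_const, List.getD_eq_getElem?_getD, List.getElem?_eq_getElem h]
  exact List.set_getElem_self h

theorem pv_getD_append_left {α : Type} (l₁ l₂ : List α) (d : α) {i : Nat}
    (h : i < l₁.length) : (l₁ ++ l₂).getD i d = l₁.getD i d := by
  simp [List.getD_eq_getElem?_getD, List.getElem?_append_left h]

theorem pv_getD_append_right {α : Type} (l₁ l₂ : List α) (d : α) {i : Nat}
    (h : l₁.length ≤ i) : (l₁ ++ l₂).getD i d = l₂.getD (i - l₁.length) d := by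
  simp [List.getD_eq_getElem?_getD, List.getElem?_append_right h]

theorem pv_set_append {α : Type} (l₁ l₂ : List α) (a v : α) :
    (l₁ ++ a :: l₂).set l₁.length v = l₁ ++ v :: l₂ := by
  rw [List.set_append_right _ _ le_rfl]
  simp

theorem pv_getD_drop {α : Type} (l : List α) (d : α) {t : Nat} {a : α} {rest : List α}
    (h : l.drop t = a :: rest) : l.getD t d = a := by
  have h0 : l[t]? = some a := by
    have := List.getElem?_drop (xs := l) (i := t) (j := 0)
    rw [h] at this
    simpa using this.symm
  simp [List.getD_eq_getElem?_getD, h0]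

theorem pv_getD_replicate {α : Type} (a d : α) {n i : Nat} (h : i < n) :
    (List.replicate n a).getD i d = a := by
  simp [List.getD_eq_getElem?_getD, h]

theorem pv_modify2_self (A : List (List (List Int))) {i j : Nat} (R : List Int)
    (hi : i < A.length) (hj : j < (A.getD i []).length)
    (hR : R = (A.getD i []).getD j []) :
    A.modify i (fun P => P.modify j (fun _ => R)) = A := by
  have h1 : (A.getD i []).modify j (fun _ => R) = A.getD i [] := by
    rw [hR]; exact pv_modify_self _ _ hj
  rw [List.modify_eq_set]
  have hd : (A[i]?.getD default) = A.getD i [] := by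
    rw [List.getD_eq_getElem?_getD]; rfl
  rw [hd, h1, List.getD_eq_getElem?_getD, List.getElem?_eq_getElem hi]
  exact List.set_getElem_self hi

theorem pv_modify2_collapse (A : List (List (List Int))) (i j : Nat)
    (f : List Int → List Int) (R : List Int) :
    (A.modify i (fun P => P.modify j f)).modify i (fun P => P.modify j (fun _ => R))
      = A.modify i (fun P => P.modify j (fun _ => R)) := by
  rw [pv_modify_modify]
  congr 1
  funext P
  rw [pv_modify_modify]

-- the value written into one cell (proof bookkeeping only)
def pvVal (xi yj zk : Int) (left up diag : List Int) (kk : Nat) (acc : Int) : Int :=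
  let v1 := acc
  let v2 := left.getD kk 0
  let v3 := left.getD (kk-1) 0
  let v4 := up.getD kk 0
  let v5 := up.getD (kk-1) 0
  let v6 := diag.getD kk 0
  let v7 := diag.getD (kk-1) 0
  if (xi = yj ∧ yj = zk) ∧
      (v1 = v2 ∧ v2 = v3 ∧ v3 = v4 ∧ v4 = v5 ∧ v5 = v6 ∧ v6 = v7) then
    max (max (max (max (max (max v1 v2) v3) v4) v5) v6) (v7 + 1)
  else
    max (max (max (max (max (max v1 v2) v3) v4) v5) v6) v7

-- row / slice / table builders: what A's loops leave in the table (proof bookkeeping only)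
def pvRowB (xi yj : Int) (left up diag : List Int) : List Int → Nat → Int → List Int
  | [], _, _ => []
  | zk :: zs, kk, acc =>
    let val := pvVal xi yj zk left up diag kk acc
    val :: pvRowB xi yj left up diag zs (kk+1) val

def pvSliceB (xi : Int) (z : List Int) (prev : List (List Int)) :
    List Int → Nat → List Int → List (List Int)
  | [], _, _ => []
  | yj :: ys, jj, leftRow =>
    let row := (0:Int) :: pvRowB xi yj leftRow (prev.getD jj []) (prev.getD (jj-1) []) z 1 0
    row :: pvSliceB xi z prev ys (jj+1) row

def pvTableB (y z : List Int) : List Int → List (List Int) → List (List (List Int))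
  | [], _ => []
  | xi :: xs, prev =>
    let zr := List.replicate (z.length+1) (0:Int)
    let cur := zr :: pvSliceB xi z prev y 1 zr
    cur :: pvTableB y z xs cur

theorem pvRowB_cons (xi yj zk : Int) (left up diag : List Int) (zs : List Int)
    (kk : Nat) (acc : Int) :
    pvRowB xi yj left up diag (zk :: zs) kk acc
      = pvVal xi yj zk left up diag kk acc
        :: pvRowB xi yj left up diag zs (kk+1) (pvVal xi yj zk left up diag kk acc) := by
  simp [pvRowB]

theorem pvStepA_eq (x y z : List Int) (i0 j0 t : Nat) (A : List (List (List Int)))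
    (acc zk : Int)
    (hv1 : ((A.getD (i0+1) []).getD (j0+1) []).getD t 0 = acc) (hzk : z.getD t 0 = zk) :
    pvStepA x y z i0 j0 A t
      = A.modify (i0+1) (fun P => P.modify (j0+1) (fun r => r.set (t+1)
          (pvVal (x.getD i0 0) (y.getD j0 0) zk
            ((A.getD (i0+1) []).getD j0 [])
            ((A.getD i0 []).getD (j0+1) [])
            ((A.getD i0 []).getD j0 [])
            (t+1) acc))) := by
  simp only [pvStepA, pvSet3, pvVal, pvGet3, hv1, hzk, Nat.add_sub_cancel]
  split_ifs <;> rfl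

-- inner loop of A fills row (i0+1, j0+1) exactly as pvRowB builds it
theorem pv_inner (x y z : List Int) (i0 j0 : Nat) :
    ∀ (zs : List Int) (t : Nat) (A : List (List (List Int))) (pref : List Int),
    zs = z.drop t → pref.length = t + 1 →
    i0 + 1 < A.length → j0 + 1 < (A.getD (i0+1) []).length →
    (A.getD (i0+1) []).getD (j0+1) [] = pref ++ List.replicate zs.length 0 →
    (List.range' t zs.length).foldl (pvStepA x y z i0 j0) A
      = A.modify (i0+1) (fun P => P.modify (j0+1) (fun _ =>
          pref ++ pvRowB (x.getD i0 0) (y.getD j0 0)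
            ((A.getD (i0+1) []).getD j0 [])
            ((A.getD i0 []).getD (j0+1) [])
            ((A.getD i0 []).getD j0 [])
            zs (t+1) (pref.getD t 0))) := by
  intro zs
  induction zs with
  | nil =>
    intro t A pref hzs hlen hi hj hrow
    simp only [List.length_nil, List.range'_zero, List.foldl_nil, pvRowB, List.append_nil]
    exact (pv_modify2_self A pref hi hj (by simpa using hrow.symm)).symm
  | cons zk zs' ih =>
    intro t A pref hzs hlen hi hj hrow
    have htpref : t < pref.length := by omega
    have hzk : z.getD t 0 = zk := pv_getD_drop z 0 hzs.symm
    have hzs' : zs' = z.drop (t+1) := by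
      have h1 := congrArg (List.drop 1) hzs
      simpa [List.drop_drop, Nat.add_comm] using h1
    simp only [List.length_cons] at hrow ⊢
    have hv1 : ((A.getD (i0+1) []).getD (j0+1) []).getD t 0 = pref.getD t 0 := by
      rw [hrow, pv_getD_append_left _ _ _ htpref]
    set left := (A.getD (i0+1) []).getD j0 [] with hleft
    set up := (A.getD i0 []).getD (j0+1) [] with hup
    set diag := (A.getD i0 []).getD j0 [] with hdiag
    set val := pvVal (x.getD i0 0) (y.getD j0 0) zk left up diag (t+1) (pref.getD t 0) with hval
    simp only [List.range'_succ, List.foldl_cons]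
    rw [pvStepA_eq x y z i0 j0 t A (pref.getD t 0) zk hv1 hzk]
    set A' := A.modify (i0+1) (fun P => P.modify (j0+1) (fun r => r.set (t+1) val)) with hA'
    have hA'top : A'.getD (i0+1) []
        = (A.getD (i0+1) []).modify (j0+1) (fun r => r.set (t+1) val) :=
      pv_getD_modify_eq _ _ _ hi
    have hA'toplen : (A'.getD (i0+1) []).length = (A.getD (i0+1) []).length := by
      rw [hA'top]; exact List.length_modify ..
    have hA'row : (A'.getD (i0+1) []).getD (j0+1) []
        = (pref ++ [val]) ++ List.replicate zs'.length 0 := by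
      rw [hA'top, pv_getD_modify_eq _ _ _ hj, hrow]
      rw [show List.replicate (zs'.length + 1) (0:Int) = 0 :: List.replicate zs'.length 0 from
        List.replicate_succ ..]
      rw [← hlen, pv_set_append]
      simp
    have hA'left : (A'.getD (i0+1) []).getD j0 [] = left := by
      rw [hA'top, pv_getD_modify_ne _ _ _ (by omega)]
    have hA'prev : A'.getD i0 [] = A.getD i0 [] :=
      pv_getD_modify_ne _ _ _ (by omega)
    have hIH := ih (t+1) A' (pref ++ [val]) hzs' (by simp [hlen])
      (by rw [hA']; rw [List.length_modify]; exact hi)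
      (by rw [hA'toplen]; exact hj) (by simpa using hA'row)
    rw [hIH, hA'left, hA'prev, ← hup, ← hdiag]
    rw [show (pref ++ [val]).getD (t+1) 0 = val by
      rw [← hlen, pv_getD_append_right _ _ _ le_rfl]; simp]
    rw [hA', pv_modify2_collapse]
    rw [pvRowB_cons, ← hval]
    simp

theorem pv_modify_collapse {α : Type} (l : List α) (i : Nat) (f : α → α) (R : α) :
    (l.modify i f).modify i (fun _ => R) = l.modify i (fun _ => R) := by
  rw [pv_modify_modify]

theorem pvSliceB_cons (xi : Int) (z : List Int) (prev : List (List Int)) (yj : Int)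
    (ys : List Int) (jj : Nat) (leftRow : List Int) :
    pvSliceB xi z prev (yj :: ys) jj leftRow
      = ((0:Int) :: pvRowB xi yj leftRow (prev.getD jj []) (prev.getD (jj-1) []) z 1 0)
        :: pvSliceB xi z prev ys (jj+1)
          ((0:Int) :: pvRowB xi yj leftRow (prev.getD jj []) (prev.getD (jj-1) []) z 1 0) := by
  simp [pvSliceB]

-- middle loop of A fills slice i0+1 exactly as pvSliceB builds it
theorem pv_mid (x y z : List Int) (i0 : Nat) :
    ∀ (ys : List Int) (t : Nat) (A : List (List (List Int))) (prefR : List (List Int)),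
    ys = y.drop t → prefR.length = t + 1 →
    i0 + 1 < A.length →
    A.getD (i0+1) [] = prefR ++ List.replicate ys.length (List.replicate (z.length+1) 0) →
    (List.range' t ys.length).foldl (fun A j0 =>
        (List.range z.length).foldl (pvStepA x y z i0 j0) A) A
      = A.modify (i0+1) (fun _ =>
          prefR ++ pvSliceB (x.getD i0 0) z (A.getD i0 []) ys (t+1) (prefR.getD t [])) := by
  intro ys
  induction ys with
  | nil =>
    intro t A prefR hys hlen hi hslice
    simp only [List.length_nil, List.range'_zero, List.foldl_nil, pvSliceB, List.append_nil]
    have h0 : prefR = A.getD (i0+1) [] := by simpa using hslice.symm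
    rw [h0]
    exact (pv_modify_self A [] hi).symm
  | cons yj ys' ih =>
    intro t A prefR hys hlen hi hslice
    simp only [List.length_cons] at hslice ⊢
    have htpref : t < prefR.length := by omega
    have hyj : y.getD t 0 = yj := pv_getD_drop y 0 hys.symm
    have hys' : ys' = y.drop (t+1) := by
      have h1 := congrArg (List.drop 1) hys
      simpa [List.drop_drop, Nat.add_comm] using h1
    have hslen : (A.getD (i0+1) []).length = t + 1 + (ys'.length + 1) := by
      rw [hslice]; simp [hlen]
    simp only [List.range'_succ, List.foldl_cons]
    have hinner := pv_inner x y z i0 t z 0 A [0] (by simp) (by simp) hi (by omega)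
      (by
        rw [hslice, ← hlen, pv_getD_append_right _ _ _ le_rfl, Nat.sub_self,
          pv_getD_replicate _ _ (Nat.succ_pos _), List.replicate_succ]
        simp)
    rw [← List.range_eq_range'] at hinner
    rw [hinner, hyj]
    rw [show ((A.getD (i0+1) []).getD t []) = prefR.getD t [] by
      rw [hslice, pv_getD_append_left _ _ _ htpref]]
    rw [show ([ (0:Int) ].getD 0 0) = 0 from rfl]
    simp only [List.singleton_append, Nat.zero_add]
    set ROW := (0:Int) :: pvRowB (x.getD i0 0) yj (prefR.getD t [])
      ((A.getD i0 []).getD (t+1) []) ((A.getD i0 []).getD t []) z 1 0 with hROW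
    set A' := A.modify (i0+1) (fun P => P.modify (t+1) (fun _ => ROW)) with hA'
    have hA'top : A'.getD (i0+1) []
        = (prefR ++ [ROW]) ++ List.replicate ys'.length (List.replicate (z.length+1) 0) := by
      rw [hA', pv_getD_modify_eq _ _ _ hi, pv_modify_const, hslice, List.replicate_succ,
        ← hlen, pv_set_append]
      simp
    have hA'prev : A'.getD i0 [] = A.getD i0 [] :=
      pv_getD_modify_ne _ _ _ (by omega)
    have hIH := ih (t+1) A' (prefR ++ [ROW]) hys' (by simp [hlen])
      (by rw [hA', List.length_modify]; exact hi) hA'top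
    rw [hIH, hA'prev]
    rw [show (prefR ++ [ROW]).getD (t+1) [] = ROW by
      rw [← hlen, pv_getD_append_right _ _ _ le_rfl]; simp]
    rw [hA', pv_modify_collapse]
    rw [pvSliceB_cons, Nat.add_sub_cancel, ← hROW]
    simp only [List.append_assoc, List.singleton_append]

theorem pvTableB_cons (y z : List Int) (xi : Int) (xs : List Int) (prev : List (List Int)) :
    pvTableB y z (xi :: xs) prev
      = (List.replicate (z.length+1) (0:Int)
          :: pvSliceB xi z prev y 1 (List.replicate (z.length+1) (0:Int)))
        :: pvTableB y z xs
          (List.replicate (z.length+1) (0:Int)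
            :: pvSliceB xi z prev y 1 (List.replicate (z.length+1) (0:Int))) := by
  simp [pvTableB]

-- outer loop of A builds the slices exactly as pvTableB does
theorem pv_outer (x y z : List Int) :
    ∀ (xs : List Int) (t : Nat) (A : List (List (List Int))) (prefS : List (List (List Int))),
    xs = x.drop t → prefS.length = t + 1 →
    A = prefS ++ List.replicate xs.length
          (List.replicate (y.length+1) (List.replicate (z.length+1) 0)) →
    (List.range' t xs.length).foldl (fun A i0 =>
        (List.range y.length).foldl (fun A j0 =>
          (List.range z.length).foldl (pvStepA x y z i0 j0) A) A) A
      = prefS ++ pvTableB y z xs (prefS.getD t []) := by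
  intro xs
  induction xs with
  | nil =>
    intro t A prefS hxs hlen hA
    simp only [List.length_nil, List.range'_zero, List.foldl_nil, pvTableB, List.append_nil]
    simpa using hA
  | cons xi xs' ih =>
    intro t A prefS hxs hlen hA
    simp only [List.length_cons] at hA ⊢
    have htpref : t < prefS.length := by omega
    have hxi : x.getD t 0 = xi := pv_getD_drop x 0 hxs.symm
    have hxs' : xs' = x.drop (t+1) := by
      have h1 := congrArg (List.drop 1) hxs
      simpa [List.drop_drop, Nat.add_comm] using h1
    have hAlen : A.length = t + 1 + (xs'.length + 1) := by rw [hA]; simp [hlen]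
    simp only [List.range'_succ, List.foldl_cons]
    have hAslice : A.getD (t+1) []
        = List.replicate (y.length+1) (List.replicate (z.length+1) 0) := by
      rw [hA, ← hlen, pv_getD_append_right _ _ _ le_rfl, Nat.sub_self,
        pv_getD_replicate _ _ (Nat.succ_pos _)]
    have hmid := pv_mid x y z t y 0 A [List.replicate (z.length+1) (0:Int)]
      (by simp) (by simp) (by omega)
      (by rw [hAslice, List.replicate_succ]; simp)
    rw [← List.range_eq_range'] at hmid
    rw [hmid, hxi]
    rw [show (A.getD t []) = prefS.getD t [] by
      rw [hA, pv_getD_append_left _ _ _ htpref]]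
    rw [show ([List.replicate (z.length+1) (0:Int)].getD 0 []) = List.replicate (z.length+1) (0:Int) from rfl]
    simp only [Nat.zero_add, List.singleton_append]
    set CUR := List.replicate (z.length+1) (0:Int)
      :: pvSliceB xi z (prefS.getD t []) y 1 (List.replicate (z.length+1) (0:Int)) with hCUR
    set A' := A.modify (t+1) (fun _ => CUR) with hA'
    have hA'eq : A' = (prefS ++ [CUR]) ++ List.replicate xs'.length
        (List.replicate (y.length+1) (List.replicate (z.length+1) 0)) := by
      rw [hA', pv_modify_const, hA, List.replicate_succ, ← hlen, pv_set_append]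
      simp
    have hIH := ih (t+1) A' (prefS ++ [CUR]) hxs' (by simp [hlen]) hA'eq
    rw [hIH]
    rw [show (prefS ++ [CUR]).getD (t+1) [] = CUR by
      rw [← hlen, pv_getD_append_right _ _ _ le_rfl]; simp]
    rw [pvTableB_cons, ← hCUR]
    simp

-- ---- the builders produce exactly the rows/slices of cell

theorem pvRowB_cell (x y z : List Int) (i0 j0 : Nat) (left up diag : List Int)
    (hL : ∀ a, a ≤ z.length → left.getD a 0 = cell x y z (i0+1) j0 a)
    (hU : ∀ a, a ≤ z.length → up.getD a 0 = cell x y z i0 (j0+1) a)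
    (hD : ∀ a, a ≤ z.length → diag.getD a 0 = cell x y z i0 j0 a) :
    ∀ (zs : List Int) (t : Nat) (acc : Int), zs = z.drop t →
      acc = cell x y z (i0+1) (j0+1) t →
    pvRowB (x.getD i0 0) (y.getD j0 0) left up diag zs (t+1) acc
      = (List.range' (t+1) zs.length).map (cell x y z (i0+1) (j0+1)) := by
  intro zs
  induction zs with
  | nil => intro t acc _ _; simp [pvRowB]
  | cons zk zs' ih =>
    intro t acc hzs hacc
    have ht : t < z.length := by
      by_contra hcon
      rw [List.drop_eq_nil_of_le (by omega)] at hzs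
      simp at hzs
    have hzk : z.getD t 0 = zk := pv_getD_drop z 0 hzs.symm
    have hzs' : zs' = z.drop (t+1) := by
      have h1 := congrArg (List.drop 1) hzs
      simpa [List.drop_drop, Nat.add_comm] using h1
    rw [pvRowB_cons]
    have hval : pvVal (x.getD i0 0) (y.getD j0 0) zk left up diag (t+1) acc
        = cell x y z (i0+1) (j0+1) (t+1) := by
      rw [cell_of_pos x y z (i0+1) (j0+1) (t+1) (by omega) (by omega) (by omega)]
      simp only [pvVal, Nat.add_sub_cancel]
      rw [hL (t+1) (by omega), hL t (by omega), hU (t+1) (by omega), hU t (by omega),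
        hD (t+1) (by omega), hD t (by omega), hzk, hacc]
    rw [hval]
    simp only [List.length_cons, List.range'_succ, List.map_cons]
    rw [ih (t+1) _ hzs' rfl]

theorem pvSliceB_cell (x y z : List Int) (i0 : Nat) (prev : List (List Int))
    (hP : ∀ b, b ≤ y.length → prev.getD b [] = rowOf x y z i0 b) :
    ∀ (ys : List Int) (t : Nat) (leftRow : List Int), ys = y.drop t →
      leftRow = rowOf x y z (i0+1) t →
    pvSliceB (x.getD i0 0) z prev ys (t+1) leftRow
      = (List.range' (t+1) ys.length).map (rowOf x y z (i0+1)) := by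
  intro ys
  induction ys with
  | nil => intro t leftRow _ _; simp [pvSliceB]
  | cons yj ys' ih =>
    intro t leftRow hys hleft
    have ht : t < y.length := by
      by_contra hcon
      rw [List.drop_eq_nil_of_le (by omega)] at hys
      simp at hys
    have hyj : y.getD t 0 = yj := pv_getD_drop y 0 hys.symm
    have hys' : ys' = y.drop (t+1) := by
      have h1 := congrArg (List.drop 1) hys
      simpa [List.drop_drop, Nat.add_comm] using h1
    rw [pvSliceB_cons, Nat.add_sub_cancel]
    have hrow : pvRowB (x.getD i0 0) yj leftRow (prev.getD (t+1) []) (prev.getD t []) z 1 0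
        = (List.range' 1 z.length).map (cell x y z (i0+1) (t+1)) := by
      rw [← hyj]
      have := pvRowB_cell x y z i0 t leftRow (prev.getD (t+1) []) (prev.getD t [])
        (fun a ha => by
          rw [hleft, rowOf, PySem.List.getD_map_range _ _ _ _ (by omega)])
        (fun a ha => by
          rw [hP (t+1) (by omega), rowOf, PySem.List.getD_map_range _ _ _ _ (by omega)])
        (fun a ha => by
          rw [hP t (by omega), rowOf, PySem.List.getD_map_range _ _ _ _ (by omega)])
        z 0 0 (by simp) ((cell_zero x y z (i0+1) (t+1) 0 (by omega)).symm)
      simpa using this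
    rw [hrow]
    have hrowOf : rowOf x y z (i0+1) (t+1)
        = (0:Int) :: (List.range' 1 z.length).map (cell x y z (i0+1) (t+1)) := by
      rw [rowOf_cons, cell_zero x y z (i0+1) (t+1) 0 (by omega)]
    rw [← hrowOf]
    simp only [List.length_cons, List.range'_succ, List.map_cons]
    rw [ih (t+1) _ hys' rfl]

theorem pvTableB_cell (x y z : List Int) :
    ∀ (xs : List Int) (t : Nat) (prev : List (List Int)), xs = x.drop t →
      (∀ b, b ≤ y.length → prev.getD b [] = rowOf x y z t b) →
    pvTableB y z xs prev = (List.range' (t+1) xs.length).map (sliceOf x y z) := by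
  intro xs
  induction xs with
  | nil => intro t prev _ _; simp [pvTableB]
  | cons xi xs' ih =>
    intro t prev hxs hP
    have hxi : x.getD t 0 = xi := pv_getD_drop x 0 hxs.symm
    have hxs' : xs' = x.drop (t+1) := by
      have h1 := congrArg (List.drop 1) hxs
      simpa [List.drop_drop, Nat.add_comm] using h1
    rw [pvTableB_cons, ← hxi]
    have hsl : pvSliceB (x.getD t 0) z prev y 1 (List.replicate (z.length+1) (0:Int))
        = (List.range' 1 y.length).map (rowOf x y z (t+1)) := by
      have := pvSliceB_cell x y z t prev hP y 0 (List.replicate (z.length+1) (0:Int))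
        (by simp) ((rowOf_mid_zero x y z (t+1)).symm)
      simpa using this
    rw [hsl]
    have hslice : sliceOf x y z (t+1)
        = List.replicate (z.length+1) (0:Int)
          :: (List.range' 1 y.length).map (rowOf x y z (t+1)) := by
      rw [sliceOf_cons, rowOf_mid_zero]
    rw [← hslice]
    simp only [List.length_cons, List.range'_succ, List.map_cons]
    rw [ih (t+1) _ hxs' (fun b hb => by
      rw [sliceOf, PySem.List.getD_map_range _ _ _ _ (by omega)])]

theorem a_eq_cells (x y z : List Int) :
    matrix_3D x y z = (List.range (x.length+1)).map (sliceOf x y z) := by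
  simp only [matrix_3D]
  have h := pv_outer x y z x 0 _
    [List.replicate (y.length+1) (List.replicate (z.length+1) 0)] (by simp) (by simp) rfl
  rw [show List.range x.length = List.range' 0 x.length from List.range_eq_range']
  rw [show (List.replicate (x.length+1)
        (List.replicate (y.length+1) (List.replicate (z.length+1) (0:Int))))
      = [List.replicate (y.length+1) (List.replicate (z.length+1) (0:Int))]
        ++ List.replicate x.length
            (List.replicate (y.length+1) (List.replicate (z.length+1) (0:Int))) by
    simp [List.replicate_succ]]
  rw [h]
  have htab := pvTableB_cell x y z x 0
    (List.replicate (y.length+1) (List.replicate (z.length+1) 0)) (by simp)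
    (fun b hb => by rw [pv_getD_replicate _ _ (by omega), rowOf_left_zero])
  simp only [List.getD_cons_zero]
  rw [htab, List.range_eq_range',
    show List.range' 0 (x.length+1) = 0 :: List.range' 1 x.length from List.range'_succ,
    List.map_cons, sliceOf_zero]
  simp

-- ---- B-side: the wavefront dict contains exactly the interior cells of the layers done

-- MemoSpec: the wavefront dict holds exactly the interior cells already written when the
-- loops stand at layer s, row i, column t
def MemoSpec (x y z : List Int) (memo : PySem.Dict (Nat × Nat × Nat) Int) (s i t : Nat) : Prop :=
  ∀ a b c : Nat, a ≤ x.length → b ≤ y.length → c ≤ z.length →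
    memo.getD (a, b, c) 0 =
      if 1 ≤ a ∧ 1 ≤ b ∧ 1 ≤ c ∧ (a + b + c < s ∨ (a + b + c = s ∧ (a < i ∨ (a = i ∧ b ≤ t)))) then cell x y z a b c else 0

theorem memoSpec_getD_of_lt {x y z : List Int}
    {memo : PySem.Dict (Nat × Nat × Nat) Int} {s i t : Nat}
    (h : MemoSpec x y z memo s i t) {a b c : Nat}
    (ha : a ≤ x.length) (hb : b ≤ y.length) (hc : c ≤ z.length) (hsum : a + b + c < s) :
    memo.getD (a, b, c) 0 = cell x y z a b c := by
  rw [h a b c ha hb hc]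
  by_cases h1 : 1 ≤ a ∧ 1 ≤ b ∧ 1 ≤ c
  · rw [if_pos ⟨h1.1, h1.2.1, h1.2.2, Or.inl hsum⟩]
  · rw [if_neg (fun hcon => h1 ⟨hcon.1, hcon.2.1, hcon.2.2.1⟩)]
    exact (cell_zero x y z a b c (by omega)).symm

theorem pvCellStep_spec (x y z : List Int) (s i t : Nat)
    (hi1 : 1 ≤ i) (hin : i ≤ x.length) (htm : t < y.length)
    (memo : PySem.Dict (Nat × Nat × Nat) Int) (h : MemoSpec x y z memo s i t) :
    MemoSpec x y z (pvCellStep x y z s i (t+1) memo) s i (t+1) := by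
  by_cases hk : 1 ≤ (s:Int) - (i:Int) - ((t+1 : Nat):Int)
      ∧ (s:Int) - (i:Int) - ((t+1 : Nat):Int) ≤ (z.length:Int)
  · obtain ⟨hk1, hk2⟩ := hk
    have hkdef : ((s:Int) - (i:Int) - ((t+1 : Nat):Int)).toNat
        = ((s:Int) - (i:Int) - ((t+1 : Nat):Int)).toNat := rfl
    set k : Nat := ((s:Int) - (i:Int) - ((t+1 : Nat):Int)).toNat with hkd
    have hk1' : 1 ≤ k := by omega
    have hkK : k ≤ z.length := by omega
    have hsum : i + (t+1) + k = s := by omega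
    have hstep : pvCellStep x y z s i (t+1) memo
        = memo.insert (i, t+1, k) (cell x y z i (t+1) k) := by
      simp only [pvCellStep, Nat.add_sub_cancel]
      rw [if_pos ⟨hk1, hk2⟩, ← hkd, ← apply_ite (memo.insert (i, t+1, k))]
      congr 1
      rw [memoSpec_getD_of_lt h (le_trans (by omega) hin) (by omega) (by omega) (by omega),
        memoSpec_getD_of_lt h hin (by omega) hkK (by omega),
        memoSpec_getD_of_lt h hin (by omega) (by omega) (by omega),
        memoSpec_getD_of_lt h (by omega) (by omega) hkK (by omega),
        memoSpec_getD_of_lt h (by omega) (by omega) (by omega) (by omega),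
        memoSpec_getD_of_lt h (by omega) (by omega) hkK (by omega),
        memoSpec_getD_of_lt h (by omega) (by omega) (by omega) (by omega)]
      rw [cell_of_pos x y z i (t+1) k hi1 (by omega) hk1']
      simp only [Nat.add_sub_cancel]
    rw [hstep]
    intro a b c ha hb hc
    rw [PySem.Dict.getD_insert]
    by_cases heq : (a, b, c) = ((i, t+1, k) : Nat × Nat × Nat)
    · rw [if_pos heq]
      obtain ⟨ea, eb, ec⟩ : a = i ∧ b = t+1 ∧ c = k := by
        simpa [Prod.ext_iff] using heq
      subst ea; subst eb; subst ec
      rw [if_pos ⟨hi1, by omega, hk1', by omega⟩]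
    · rw [if_neg heq, h a b c ha hb hc]
      have hne : ¬(a = i ∧ b = t+1 ∧ c = k) := fun hcon =>
        heq (by simp [hcon.1, hcon.2.1, hcon.2.2])
      exact if_congr (by omega) rfl rfl
  · have hstep : pvCellStep x y z s i (t+1) memo = memo := by
      simp only [pvCellStep]
      rw [if_neg hk]
    rw [hstep]
    intro a b c ha hb hc
    rw [h a b c ha hb hc]
    refine if_congr ?_ rfl rfl
    push_cast at hk
    omega

theorem pvInner_spec (x y z : List Int) (s i : Nat) (hi1 : 1 ≤ i) (hin : i ≤ x.length) :
    ∀ (cnt t : Nat) (memo : PySem.Dict (Nat × Nat × Nat) Int),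
      t + cnt = y.length → MemoSpec x y z memo s i t →
      MemoSpec x y z ((List.range' (t+1) cnt).foldl
        (fun memo j => pvCellStep x y z s i j memo) memo) s i y.length := by
  intro cnt
  induction cnt with
  | zero =>
    intro t memo h0 h
    have ht : t = y.length := by omega
    subst ht
    simpa using h
  | succ c ih =>
    intro t memo h0 h
    rw [List.range'_succ, List.foldl_cons]
    exact ih (t+1) _ (by omega) (pvCellStep_spec x y z s i t hi1 hin (by omega) memo h)

theorem memoSpec_next_i {x y z : List Int}
    {memo : PySem.Dict (Nat × Nat × Nat) Int} {s i : Nat}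
    (h : MemoSpec x y z memo s i y.length) : MemoSpec x y z memo s (i+1) 0 := by
  intro a b c ha hb hc
  rw [h a b c ha hb hc]
  exact if_congr (by omega) rfl rfl

theorem pvOuter_spec (x y z : List Int) (s : Nat) :
    ∀ (cnt i0 : Nat) (memo : PySem.Dict (Nat × Nat × Nat) Int),
      i0 + cnt = x.length → MemoSpec x y z memo s (i0+1) 0 →
      MemoSpec x y z ((List.range' (i0+1) cnt).foldl
        (fun memo i => (List.range' 1 y.length).foldl
          (fun memo j => pvCellStep x y z s i j memo) memo) memo) s (x.length+1) 0 := by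
  intro cnt
  induction cnt with
  | zero =>
    intro i0 memo h0 h
    have hi : i0 = x.length := by omega
    subst hi
    simpa using h
  | succ c ih =>
    intro i0 memo h0 h
    rw [List.range'_succ, List.foldl_cons]
    have hmid := pvInner_spec x y z s (i0+1) (by omega) (by omega) y.length 0 memo
      (by omega) h
    exact ih (i0+1) _ (by omega) (memoSpec_next_i hmid)

theorem memoSpec_next_s {x y z : List Int}
    {memo : PySem.Dict (Nat × Nat × Nat) Int} {s : Nat}
    (h : MemoSpec x y z memo s (x.length+1) 0) : MemoSpec x y z memo (s+1) 1 0 := by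
  intro a b c ha hb hc
  rw [h a b c ha hb hc]
  exact if_congr (by omega) rfl rfl

theorem pvLayers_spec (x y z : List Int) :
    ∀ (cnt s : Nat) (memo : PySem.Dict (Nat × Nat × Nat) Int),
      MemoSpec x y z memo s 1 0 →
      MemoSpec x y z ((List.range' s cnt).foldl
        (fun memo s' => (List.range' 1 x.length).foldl
          (fun memo i => (List.range' 1 y.length).foldl
            (fun memo j => pvCellStep x y z s' i j memo) memo) memo) memo) (s+cnt) 1 0 := by
  intro cnt
  induction cnt with
  | zero => intro s memo h; simpa using h
  | succ c ih =>
    intro s memo h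
    rw [List.range'_succ, List.foldl_cons]
    have houter := pvOuter_spec x y z s x.length 0 memo (by omega) h
    have hres := ih (s+1) _ (memoSpec_next_s houter)
    rw [show s + (c+1) = s + 1 + c by omega]
    exact hres

theorem memoSpec_init (x y z : List Int) : MemoSpec x y z PySem.Dict.empty 3 1 0 := by
  intro a b c _ _ _
  rw [PySem.Dict.getD_empty, if_neg (by omega)]

theorem alt_eq_cells (x y z : List Int) :
    matrix_3D_alt x y z = (List.range (x.length+1)).map (sliceOf x y z) := by
  simp only [matrix_3D_alt]
  have hspec := pvLayers_spec x y z (x.length + y.length + z.length + 1 - 3) 3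
    PySem.Dict.empty (memoSpec_init x y z)
  apply List.map_congr_left
  intro i hi
  rw [sliceOf]
  apply List.map_congr_left
  intro j hj
  rw [rowOf]
  apply List.map_congr_left
  intro k hk
  have ha : i ≤ x.length := by have := List.mem_range.mp hi; omega
  have hb : j ≤ y.length := by have := List.mem_range.mp hj; omega
  have hc : k ≤ z.length := by have := List.mem_range.mp hk; omega
  by_cases hint : 1 ≤ i ∧ 1 ≤ j ∧ 1 ≤ k
  · exact memoSpec_getD_of_lt hspec ha hb hc (by omega)
  · rw [hspec i j k ha hb hc,
      if_neg (fun hcon => hint ⟨hcon.1, hcon.2.1, hcon.2.2.1⟩)]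
    exact (cell_zero x y z i j k (by omega)).symm

-- ===== VERDICT (by name: the statement is the Claim_ definition above) =====
theorem matrix_3D_spec : Claim_equal_matrix_3D := by
  intro x y z _
  unfold Spec_matrix_3D
  rw [a_eq_cells, alt_eq_cells]
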